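-- pv_equiv track=rewrite | github.com/abunuwas/python-trees | nodes.py | buildTreeUpDown
-- ===== SOURCE A (Python) =====
-- def buildTreeUpDown(tree):
--     '''
--     This function takes as input a tree in the form of a list of lists, in which each row
--     is a list where every element is an independent member of the list. The function returns a
--     dictionary of nodes from the tree. Because it is a dictionary, nodes are not stored in any
--     particular order, and cannot be accesed by index. However, every node in the tree can be
--     found with precision via its properties in the dictionary, in particular 'row' and
--     'position' (this refers to its index in the row, starting from index 0). This function builds
--     from the up, namely from its head, down.
--     '''
--     nodes = {}
--     nodeCounter = 0
--     justAdded=[]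
--     to_add = []
--     for index, line in enumerate(tree):
--         adding=[]
--         for position, value in enumerate(line):
--             if index == 0:
--                 nodeCounter += 1
--                 nodes[nodeCounter] = {'value': value,
--                                'row': index,
--                                'position': position}
--                 adding.append(nodeCounter)
--             else:
--                 nodeCounter += 1
--                 nodes[nodeCounter] = {'value': value,
--                                       'row': index,
--                                       'position': position}
--                 for node in justAdded:
--                     if position == nodes[node]['position']:
--                         nodes[node]['L'] = nodeCounter
--
--                     if position == nodes[node]['position']+1:
--                         nodes[node]['R'] = nodeCounter
--                 if index == len(tree)-1: nodes[nodeCounter].update({'L': None, 'R': None})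
--                 adding.append(nodeCounter)
--
--         justAdded = set(adding)
--
--     return nodes
-- ===== SOURCE B (Python) =====
-- def buildTreeUpDown(tree):
--     nodes = {}
--     counter = 0
--     prev_start = 0
--     prev_len = 0
--     last = len(tree) - 1
--     for index, line in enumerate(tree):
--         start = counter
--         for position, value in enumerate(line):
--             counter += 1
--             node = {'value': value, 'row': index, 'position': position}
--             if index == last and index > 0:
--                 node['L'] = None
--                 node['R'] = None
--             nodes[counter] = node
--             if index > 0:
--                 if 0 <= position - 1 < prev_len:
--                     nodes[prev_start + position]['R'] = counter
--                 if position < prev_len: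
--                     nodes[prev_start + position + 1]['L'] = counter
--         prev_start = start
--         prev_len = len(line)
--     return nodes
-- ===== Notes on version B (the rewrite author's own statement) =====
-- stated objective: faster
-- what changed: A links children to parents by scanning the whole previous-row node set for every child and looking each candidate parent's position up in the dict; B keeps only the previous row's start id and length and assigns each child's L/R parent links by direct arithmetic indexing (parent id = prev_start + position [+1]) in one linear pass.
import Mathlib
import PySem

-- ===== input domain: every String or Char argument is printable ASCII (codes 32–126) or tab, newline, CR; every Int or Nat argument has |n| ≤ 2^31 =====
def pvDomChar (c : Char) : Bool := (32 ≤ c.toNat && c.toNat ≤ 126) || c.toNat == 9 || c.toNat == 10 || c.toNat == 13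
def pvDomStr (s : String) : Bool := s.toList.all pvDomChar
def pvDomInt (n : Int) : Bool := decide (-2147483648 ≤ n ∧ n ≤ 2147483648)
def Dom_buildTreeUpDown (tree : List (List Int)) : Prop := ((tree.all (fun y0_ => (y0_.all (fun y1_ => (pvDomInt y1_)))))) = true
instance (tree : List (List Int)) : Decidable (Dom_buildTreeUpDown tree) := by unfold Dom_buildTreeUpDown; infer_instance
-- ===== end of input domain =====

-- B replaces A's per-child scan over the previous row's node set by direct arithmetic
-- indexing of the parent nodes (previous row's start id + position): objective = faster.

-- ===== PORT A =====
-- one parent-scan step of the inner 'for node in justAdded' loop: two sequential conditional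
-- updates (nodes[node]['position'] is always present, so the KeyError path is unreachable;
-- Python reads it once per 'if', as here)
def stepA_parentR (position nodeCounter : Int)
    (nodes : PySem.Dict Int (PySem.Dict String (Option Int))) (node : Int) :
    PySem.Dict Int (PySem.Dict String (Option Int)) :=
  if position == ((nodes.getD node PySem.Dict.empty).getD "position" none).getD 0 + 1 then
    nodes.modify node PySem.Dict.empty (fun d => d.insert "R" (some nodeCounter))
  else nodes

def stepA_parent (position nodeCounter : Int)
    (nodes : PySem.Dict Int (PySem.Dict String (Option Int))) (node : Int) :
    PySem.Dict Int (PySem.Dict String (Option Int)) :=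
  stepA_parentR position nodeCounter
    (if position == ((nodes.getD node PySem.Dict.empty).getD "position" none).getD 0 then
       nodes.modify node PySem.Dict.empty (fun d => d.insert "L" (some nodeCounter))
     else nodes) node

-- body of 'for position, value in enumerate(line)'
def stepA_elem (tlen index : Int) (justAdded : PySem.Set Int)
    (s : PySem.Dict Int (PySem.Dict String (Option Int)) × Int × List Int) (pv : Int × Int) :
    PySem.Dict Int (PySem.Dict String (Option Int)) × Int × List Int :=
  let position := pv.1
  let value := pv.2
  let nodes := s.1
  let nodeCounter := s.2.1
  let adding := s.2.2
  if index == 0 then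
    let nodeCounter := nodeCounter + 1
    let nodes := nodes.insert nodeCounter
      (PySem.Dict.ofList [("value", some value), ("row", some index), ("position", some position)])
    (nodes, nodeCounter, adding ++ [nodeCounter])
  else
    let nodeCounter := nodeCounter + 1
    let nodes := nodes.insert nodeCounter
      (PySem.Dict.ofList [("value", some value), ("row", some index), ("position", some position)])
    let nodes := justAdded.foldl (stepA_parent position nodeCounter) nodes
    let nodes :=
      if index == tlen - 1 then
        nodes.modify nodeCounter PySem.Dict.empty (fun d => (d.insert "L" none).insert "R" none)
      else nodes
    (nodes, nodeCounter, adding ++ [nodeCounter])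

-- body of 'for index, line in enumerate(tree)'; 'justAdded = set(adding)' is iterated only to
-- update L/R of each of its members independently, so the result does not depend on hash order
def stepA_row (tlen : Int)
    (st : PySem.Dict Int (PySem.Dict String (Option Int)) × Int × PySem.Set Int) (il : Int × List Int) :
    PySem.Dict Int (PySem.Dict String (Option Int)) × Int × PySem.Set Int :=
  let inner := (PySem.List.enumerate il.2).foldl (stepA_elem tlen il.1 st.2.2)
      (st.1, st.2.1, ([] : List Int))
  (inner.1, inner.2.1, PySem.Set.ofList inner.2.2)

def buildTreeUpDown (tree : List (List Int)) : List (Int × List (String × Option Int)) :=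
  let st := (PySem.List.enumerate tree).foldl (stepA_row (tree.length : Int))
      (PySem.Dict.empty, 0, PySem.Set.empty)
  st.1.items.map (fun kv => (kv.1, kv.2.items))

-- ===== PORT B =====
-- body of B's 'for position, value in enumerate(line)'
def stepB_elem (last index prevStart prevLen : Int)
    (s : PySem.Dict Int (PySem.Dict String (Option Int)) × Int) (pv : Int × Int) :
    PySem.Dict Int (PySem.Dict String (Option Int)) × Int :=
  let position := pv.1
  let value := pv.2
  let counter := s.2 + 1
  let node : PySem.Dict String (Option Int) :=
    PySem.Dict.ofList [("value", some value), ("row", some index), ("position", some position)]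
  let node := if index == last && decide (0 < index) then (node.insert "L" none).insert "R" none else node
  let nodes := s.1.insert counter node
  let nodes :=
    if 0 < index then
      let nodes :=
        if decide (0 ≤ position - 1) && decide (position - 1 < prevLen) then
          nodes.modify (prevStart + position) PySem.Dict.empty (fun d => d.insert "R" (some counter))
        else nodes
      if position < prevLen then
        nodes.modify (prevStart + position + 1) PySem.Dict.empty (fun d => d.insert "L" (some counter))
      else nodes
    else nodes
  (nodes, counter)

-- body of B's 'for index, line in enumerate(tree)'
def stepB_row (last : Int)
    (st : PySem.Dict Int (PySem.Dict String (Option Int)) × Int × Int × Int) (il : Int × List Int) :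
    PySem.Dict Int (PySem.Dict String (Option Int)) × Int × Int × Int :=
  let start := st.2.1
  let r := (PySem.List.enumerate il.2).foldl (stepB_elem last il.1 st.2.2.1 st.2.2.2) (st.1, st.2.1)
  (r.1, r.2, start, (il.2.length : Int))

def buildTreeUpDown_alt (tree : List (List Int)) : List (Int × List (String × Option Int)) :=
  let last : Int := (tree.length : Int) - 1
  let st := (PySem.List.enumerate tree).foldl (stepB_row last) (PySem.Dict.empty, 0, 0, 0)
  st.1.items.map (fun kv => (kv.1, kv.2.items))

-- ===== PRECONDITION & SPEC =====
def Spec_buildTreeUpDown (tree : List (List Int)) (out : List (Int × List (String × Option Int))) : Prop := out = buildTreeUpDown_alt tree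
instance (tree : List (List Int)) (out : List (Int × List (String × Option Int))) : Decidable (Spec_buildTreeUpDown tree out) := by unfold Spec_buildTreeUpDown; infer_instance

-- ===== CLAIM (what is proved, stated in full; the proofs are below) =====
def Claim_equal_buildTreeUpDown : Prop := ∀ (tree : List (List Int)), Dom_buildTreeUpDown tree → Spec_buildTreeUpDown tree (buildTreeUpDown tree)


-- ===== LEMMAS AND PROOFS =====

-- proof-only abbreviations and helpers
abbrev NDict : Type := PySem.Dict String (Option Int)
abbrev NStore : Type := PySem.Dict Int NDict

-- the 'position' field of node j
def posOf (N : NStore) (j : Int) : Option Int := (N.getD j PySem.Dict.empty).getD "position" none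

-- invariant: the previous row's nodes S+1 .. S+L are present and carry their position
def HRow (N : NStore) (S : Int) (L : Nat) : Prop :=
  ∀ q : Nat, q < L → N.contains (S + 1 + (q : Int)) = true ∧ posOf N (S + 1 + (q : Int)) = some (q : Int)

-- the ids of a row of length L starting after id S
def justIds (S : Int) (L : Nat) : List Int := (List.range L).map (fun q : Nat => S + 1 + (q : Int))

-- B's two direct parent updates, as they appear inline in stepB_elem
def patchBR (p c S Lint : Int) (N : NStore) : NStore :=
  if decide (0 ≤ p - 1) && decide (p - 1 < Lint) then
    N.modify (S + p) PySem.Dict.empty (fun d => d.insert "R" (some c))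
  else N

def patchB (p c S Lint : Int) (N : NStore) : NStore :=
  if p < Lint then
    (patchBR p c S Lint N).modify (S + p + 1) PySem.Dict.empty (fun d => d.insert "L" (some c))
  else patchBR p c S Lint N

def nodeBase (v i p : Int) : NDict :=
  PySem.Dict.ofList [("value", some v), ("row", some i), ("position", some p)]

def nodeB (last i p v : Int) : NDict :=
  if i == last && decide (0 < i) then ((nodeBase v i p).insert "L" none).insert "R" none
  else nodeBase v i p

def rowB (last i S Lint : Int) (line : List Int) (p0 : Int) (st : NStore × Int) : NStore × Int :=
  (PySem.List.enumerate line p0).foldl (stepB_elem last i S Lint) st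

theorem nodeB_pos (last i p v : Int) : (nodeB last i p v).getD "position" none = some p := by
  unfold nodeB
  split_ifs <;> rfl

theorem stepB_elem_eq (last i S Lint : Int) (N : NStore) (c : Int) (pv : Int × Int) :
    stepB_elem last i S Lint (N, c) pv =
      (if 0 < i then patchB pv.1 (c + 1) S Lint (N.insert (c + 1) (nodeB last i pv.1 pv.2))
       else N.insert (c + 1) (nodeB last i pv.1 pv.2), c + 1) := rfl

theorem posOf_insert_of_ne (N : NStore) (k j : Int) (d : NDict) (h : j ≠ k) :
    posOf (N.insert k d) j = posOf N j := by
  unfold posOf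
  rw [PySem.Dict.getD_insert_of_ne _ _ _ h]

theorem posOf_insert_self (N : NStore) (k : Int) (d : NDict) :
    posOf (N.insert k d) k = d.getD "position" none := by
  unfold posOf
  rw [PySem.Dict.getD_insert_self]

theorem posOf_modify_ins (N : NStore) (k j : Int) (key : String) (v : Option Int)
    (hk : key ≠ "position") :
    posOf (N.modify k PySem.Dict.empty (fun d => d.insert key v)) j = posOf N j := by
  unfold posOf
  rw [PySem.Dict.getD_modify]
  split_ifs with h
  · subst h
    rw [PySem.Dict.getD_insert_of_ne _ _ _ (Ne.symm hk)]
  · rfl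

theorem posOf_modL (N : NStore) (k j : Int) (v : Option Int) :
    posOf (N.modify k PySem.Dict.empty (fun d => d.insert "L" v)) j = posOf N j :=
  posOf_modify_ins N k j "L" v (by decide)

theorem posOf_modR (N : NStore) (k j : Int) (v : Option Int) :
    posOf (N.modify k PySem.Dict.empty (fun d => d.insert "R" v)) j = posOf N j :=
  posOf_modify_ins N k j "R" v (by decide)

theorem contains_modify_mono (N : NStore) (k j : Int) (d0 : NDict) (f : NDict → NDict)
    (h : N.contains j = true) : (N.modify k d0 f).contains j = true := by
  rw [PySem.Dict.contains_modify]
  simp [h]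

theorem contains_insert_mono (N : NStore) (k j : Int) (d : NDict)
    (h : N.contains j = true) : (N.insert k d).contains j = true := by
  rw [PySem.Dict.contains_insert]
  simp [h]

theorem posOf_patchB (p c S Lint : Int) (N : NStore) (j : Int) :
    posOf (patchB p c S Lint N) j = posOf N j := by
  unfold patchB patchBR
  split_ifs <;> simp [posOf_modL, posOf_modR]

theorem contains_patchB_mono (p c S Lint : Int) (N : NStore) (j : Int)
    (h : N.contains j = true) : (patchB p c S Lint N).contains j = true := by
  unfold patchB patchBR
  split_ifs <;> simp [contains_modify_mono, h]

theorem HRow_patchB (p c S Lint : Int) (L : Nat) (N : NStore) (hrow : HRow N S L) :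
    HRow (patchB p c S Lint N) S L := by
  intro q hq
  exact ⟨contains_patchB_mono _ _ _ _ _ _ (hrow q hq).1, by rw [posOf_patchB]; exact (hrow q hq).2⟩

theorem HRow_insert_big (N : NStore) (k : Int) (d : NDict) (S : Int) (L : Nat)
    (hk : S + (L : Int) < k) (hrow : HRow N S L) : HRow (N.insert k d) S L := by
  intro q hq
  refine ⟨contains_insert_mono _ _ _ _ (hrow q hq).1, ?_⟩
  rw [posOf_insert_of_ne _ _ _ _ (by omega)]
  exact (hrow q hq).2

theorem patchB_both (p c S Lint : Int) (N : NStore) (h1 : 0 ≤ p - 1 ∧ p - 1 < Lint)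
    (h2 : p < Lint) :
    patchB p c S Lint N
      = (N.modify (S + p) PySem.Dict.empty (fun d => d.insert "R" (some c))).modify
          (S + p + 1) PySem.Dict.empty (fun d => d.insert "L" (some c)) := by
  unfold patchB patchBR
  rw [if_pos h2, if_pos (show (decide (0 ≤ p - 1) && decide (p - 1 < Lint)) = true by
    simp only [Bool.and_eq_true, decide_eq_true_eq]; omega)]

theorem patchB_R (p c S Lint : Int) (N : NStore) (h1 : 0 ≤ p - 1 ∧ p - 1 < Lint)
    (h2 : ¬ p < Lint) :
    patchB p c S Lint N = N.modify (S + p) PySem.Dict.empty (fun d => d.insert "R" (some c)) := by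
  unfold patchB patchBR
  rw [if_neg h2, if_pos (show (decide (0 ≤ p - 1) && decide (p - 1 < Lint)) = true by
    simp only [Bool.and_eq_true, decide_eq_true_eq]; omega)]

theorem patchB_L (p c S Lint : Int) (N : NStore) (h1 : ¬ (0 ≤ p - 1 ∧ p - 1 < Lint))
    (h2 : p < Lint) :
    patchB p c S Lint N
      = N.modify (S + p + 1) PySem.Dict.empty (fun d => d.insert "L" (some c)) := by
  unfold patchB patchBR
  rw [if_pos h2, if_neg (show ¬ ((decide (0 ≤ p - 1) && decide (p - 1 < Lint)) = true) by
    simp only [Bool.and_eq_true, decide_eq_true_eq]; exact h1)]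

theorem patchB_id (p c S Lint : Int) (N : NStore) (h1 : ¬ (0 ≤ p - 1 ∧ p - 1 < Lint))
    (h2 : ¬ p < Lint) : patchB p c S Lint N = N := by
  unfold patchB patchBR
  rw [if_neg h2, if_neg (show ¬ ((decide (0 ≤ p - 1) && decide (p - 1 < Lint)) = true) by
    simp only [Bool.and_eq_true, decide_eq_true_eq]; exact h1)]

theorem ins_ins_comm (d : NStore) (k1 k2 : Int) (v1 v2 : NDict)
    (hc : d.contains k1 = true) (hne : k1 ≠ k2) :
    (d.insert k1 v1).insert k2 v2 = (d.insert k2 v2).insert k1 v1 := by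
  have hne21 : (k2 == k1) = false := by simp [Ne.symm hne]
  by_cases hc2 : d.contains k2 = true
  · apply PySem.Dict.ext
    rw [PySem.Dict.items_insert_of_contains _ _ (by rw [PySem.Dict.contains_insert]; simp [hc2]),
        PySem.Dict.items_insert_of_contains _ _ hc,
        PySem.Dict.items_insert_of_contains _ _ (by rw [PySem.Dict.contains_insert]; simp [hc]),
        PySem.Dict.items_insert_of_contains _ _ hc2]
    rw [List.map_map, List.map_map]
    apply List.map_congr_left
    rintro ⟨a, b⟩ _
    simp only [Function.comp_apply]
    by_cases h1 : a = k1
    · subst h1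
      simp [hne]
    · by_cases h2 : a = k2
      · subst h2
        simp [h1]
      · simp [h1, h2]
  · have hc2' : d.contains k2 = false := by simpa using hc2
    apply PySem.Dict.ext
    rw [PySem.Dict.items_insert_of_not_contains _ _ (by rw [PySem.Dict.contains_insert]; simp [hne21, hc2']),
        PySem.Dict.items_insert_of_contains _ _ hc,
        PySem.Dict.items_insert_of_contains _ _ (by rw [PySem.Dict.contains_insert]; simp [hc]),
        PySem.Dict.items_insert_of_not_contains _ _ hc2']
    rw [List.map_append]
    simp [Ne.symm hne]

theorem modify_modify_comm (N : NStore) (k1 k2 : Int) (f g : NDict → NDict)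
    (hc : N.contains k1 = true) (hne : k1 ≠ k2) :
    (N.modify k1 PySem.Dict.empty f).modify k2 PySem.Dict.empty g
      = (N.modify k2 PySem.Dict.empty g).modify k1 PySem.Dict.empty f := by
  simp only [PySem.Dict.modify]
  rw [PySem.Dict.getD_insert_of_ne _ _ _ (Ne.symm hne), PySem.Dict.getD_insert_of_ne _ _ _ hne]
  exact ins_ins_comm _ _ _ _ _ hc hne

theorem modify_patchB_comm (p c S : Int) (L : Nat) (N : NStore) (cN : Int) (f : NDict → NDict)
    (hp : 0 ≤ p) (hrow : HRow N S L) (hgt : S + (L : Int) < cN) :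
    (patchB p c S (L : Int) N).modify cN PySem.Dict.empty f
      = patchB p c S (L : Int) (N.modify cN PySem.Dict.empty f) := by
  have hcontL : p < (L : Int) → N.contains (S + p + 1) = true := by
    intro hpl
    have h := (hrow p.toNat (by omega)).1
    have he : S + 1 + (p.toNat : Int) = S + p + 1 := by omega
    rwa [he] at h
  have hcontR : 0 ≤ p - 1 → p - 1 < (L : Int) → N.contains (S + p) = true := by
    intro ha hb
    have h := (hrow (p - 1).toNat (by omega)).1
    have he : S + 1 + ((p - 1).toNat : Int) = S + p := by omega
    rwa [he] at h
  by_cases hR : 0 ≤ p - 1 ∧ p - 1 < (L : Int)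
  · by_cases hL : p < (L : Int)
    · rw [patchB_both p c S (L : Int) N hR hL,
        modify_modify_comm _ _ _ _ _ (contains_modify_mono _ _ _ _ _ (hcontL hL)) (by omega),
        modify_modify_comm _ _ _ _ _ (hcontR hR.1 hR.2) (by omega),
        patchB_both p c S (L : Int) (N.modify cN PySem.Dict.empty f) hR hL]
    · rw [patchB_R p c S (L : Int) N hR hL,
        modify_modify_comm _ _ _ _ _ (hcontR hR.1 hR.2) (by omega),
        patchB_R p c S (L : Int) (N.modify cN PySem.Dict.empty f) hR hL]
  · by_cases hL : p < (L : Int)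
    · rw [patchB_L p c S (L : Int) N hR hL,
        modify_modify_comm _ _ _ _ _ (hcontL hL) (by omega),
        patchB_L p c S (L : Int) (N.modify cN PySem.Dict.empty f) hR hL]
    · rw [patchB_id p c S (L : Int) N hR hL,
        patchB_id p c S (L : Int) (N.modify cN PySem.Dict.empty f) hR hL]

theorem patchA_fold_eq (p c S : Int) (L : Nat) (N : NStore) (hp : 0 ≤ p) (hrow : HRow N S L) :
    (justIds S L).foldl (stepA_parent p c) N = patchB p c S (L : Int) N := by
  induction L with
  | zero =>
    rw [show justIds S 0 = ([] : List Int) from rfl, List.foldl_nil,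
      patchB_id p c S ((0 : Nat) : Int) N (by push_cast; omega) (by push_cast; omega)]
  | succ L ih =>
    have hrowL : HRow N S L := fun q hq => hrow q (by omega)
    have hih := ih hrowL
    have hsplit : justIds S (L + 1) = justIds S L ++ [S + 1 + (L : Int)] := by
      simp [justIds, List.range_succ]
    rw [hsplit, List.foldl_append, List.foldl_cons, List.foldl_nil, hih]
    have hgd : ((patchB p c S (L : Int) N).getD (S + 1 + (L : Int)) PySem.Dict.empty).getD
        "position" none = some (L : Int) := by
      show posOf (patchB p c S (L : Int) N) (S + 1 + (L : Int)) = some (L : Int)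
      rw [posOf_patchB]
      exact (hrow L (by omega)).2
    simp only [stepA_parent, stepA_parentR]
    rw [hgd]
    simp only [Option.getD_some]
    by_cases h1 : p = (L : Int)
    · rw [if_pos (show (p == (L : Int)) = true by simp [h1])]
      have hgd2 : (((patchB p c S (L : Int) N).modify (S + 1 + (L : Int)) PySem.Dict.empty
          (fun d => d.insert "L" (some c))).getD (S + 1 + (L : Int)) PySem.Dict.empty).getD
          "position" none = some (L : Int) := by
        show posOf _ (S + 1 + (L : Int)) = some (L : Int)
        rw [posOf_modL, posOf_patchB]
        exact (hrow L (by omega)).2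
      rw [hgd2]
      simp only [Option.getD_some]
      rw [if_neg (show ¬ ((p == (L : Int) + 1) = true) by simp only [beq_iff_eq]; omega)]
      push_cast
      by_cases hR : 0 ≤ p - 1
      · rw [patchB_R p c S (L : Int) N ⟨hR, by omega⟩ (by omega),
          patchB_both p c S ((L : Int) + 1) N ⟨hR, by omega⟩ (by omega),
          show S + 1 + (L : Int) = S + p + 1 by omega]
      · rw [patchB_id p c S (L : Int) N (by omega) (by omega),
          patchB_L p c S ((L : Int) + 1) N (by omega) (by omega),
          show S + 1 + (L : Int) = S + p + 1 by omega]
    · rw [if_neg (show ¬ ((p == (L : Int)) = true) by simp only [beq_iff_eq]; omega)]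
      rw [hgd]
      simp only [Option.getD_some]
      by_cases h2 : p = (L : Int) + 1
      · rw [if_pos (show (p == (L : Int) + 1) = true by simp [h2])]
        push_cast
        rw [patchB_id p c S (L : Int) N (by omega) (by omega),
          patchB_R p c S ((L : Int) + 1) N (by omega) (by omega),
          show S + 1 + (L : Int) = S + p by omega]
      · rw [if_neg (show ¬ ((p == (L : Int) + 1) = true) by simp only [beq_iff_eq]; omega)]
        push_cast
        by_cases hR : 0 ≤ p - 1 ∧ p - 1 < (L : Int)
        · by_cases hL : p < (L : Int)
          · rw [patchB_both p c S (L : Int) N hR hL,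
              patchB_both p c S ((L : Int) + 1) N ⟨hR.1, by omega⟩ (by omega)]
          · rw [patchB_R p c S (L : Int) N hR hL,
              patchB_R p c S ((L : Int) + 1) N ⟨hR.1, by omega⟩ (by omega)]
        · by_cases hL : p < (L : Int)
          · rw [patchB_L p c S (L : Int) N hR hL,
              patchB_L p c S ((L : Int) + 1) N (by omega) (by omega)]
          · rw [patchB_id p c S (L : Int) N hR hL,
              patchB_id p c S ((L : Int) + 1) N (by omega) (by omega)]

theorem foldB_facts (last i S Lint : Int) (line : List Int) :
    ∀ (p0 c : Int) (N : NStore),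
      ((rowB last i S Lint line p0 (N, c)).2 = c + (line.length : Int))
      ∧ (∀ j : Int, j ≤ c → posOf (rowB last i S Lint line p0 (N, c)).1 j = posOf N j)
      ∧ (∀ j : Int, N.contains j = true → (rowB last i S Lint line p0 (N, c)).1.contains j = true)
      ∧ (∀ q : Nat, q < line.length →
          (rowB last i S Lint line p0 (N, c)).1.contains (c + 1 + (q : Int)) = true
          ∧ posOf (rowB last i S Lint line p0 (N, c)).1 (c + 1 + (q : Int)) = some (p0 + (q : Int))) := by
  induction line with
  | nil =>
    intro p0 c N
    simp [rowB, PySem.List.enumerate_nil]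
  | cons v rest ih =>
    intro p0 c N
    have hstep : rowB last i S Lint (v :: rest) p0 (N, c)
        = rowB last i S Lint rest (p0 + 1) (stepB_elem last i S Lint (N, c) (p0, v)) := by
      simp [rowB, PySem.List.enumerate_cons]
    set M := (stepB_elem last i S Lint (N, c) (p0, v)).1 with hM
    have hsnd : (stepB_elem last i S Lint (N, c) (p0, v)) = (M, c + 1) := by
      rw [hM, stepB_elem_eq]
    have hMpos : ∀ j : Int, j ≠ c + 1 → posOf M j = posOf N j := by
      intro j hj
      rw [hM, stepB_elem_eq]
      dsimp only
      split_ifs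
      · rw [posOf_patchB, posOf_insert_of_ne _ _ _ _ hj]
      · rw [posOf_insert_of_ne _ _ _ _ hj]
    have hMposC : posOf M (c + 1) = some p0 := by
      rw [hM, stepB_elem_eq]
      dsimp only
      split_ifs
      · rw [posOf_patchB, posOf_insert_self, nodeB_pos]
      · rw [posOf_insert_self, nodeB_pos]
    have hMcont : ∀ j : Int, N.contains j = true → M.contains j = true := by
      intro j hj
      rw [hM, stepB_elem_eq]
      dsimp only
      split_ifs
      · exact contains_patchB_mono _ _ _ _ _ _ (contains_insert_mono _ _ _ _ hj)
      · exact contains_insert_mono _ _ _ _ hj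
    have hMcontC : M.contains (c + 1) = true := by
      rw [hM, stepB_elem_eq]
      dsimp only
      split_ifs
      · exact contains_patchB_mono _ _ _ _ _ _ (by rw [PySem.Dict.contains_insert]; simp)
      · rw [PySem.Dict.contains_insert]; simp
    obtain ⟨ih1, ih2, ih3, ih4⟩ := ih (p0 + 1) (c + 1) M
    refine ⟨?_, ?_, ?_, ?_⟩
    · rw [hstep, hsnd, ih1]
      simp only [List.length_cons]
      push_cast
      omega
    · intro j hj
      rw [hstep, hsnd, ih2 j (by omega), hMpos j (by omega)]
    · intro j hj
      rw [hstep, hsnd]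
      exact ih3 j (hMcont j hj)
    · intro q hq
      rw [hstep, hsnd]
      cases q with
      | zero =>
        constructor
        · simpa using ih3 (c + 1) hMcontC
        · have := ih2 (c + 1) (by omega)
          simpa [hMposC] using this
      | succ q' =>
        have hq' : q' < rest.length := by simpa using hq
        obtain ⟨h1, h2⟩ := ih4 q' hq'
        constructor
        · have he : c + 1 + ((q' + 1 : Nat) : Int) = c + 1 + 1 + (q' : Int) := by push_cast; omega
          rw [he]
          exact h1
        · have he : c + 1 + ((q' + 1 : Nat) : Int) = c + 1 + 1 + (q' : Int) := by push_cast; omega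
          have hv : p0 + 1 + (q' : Int) = p0 + ((q' + 1 : Nat) : Int) := by push_cast; omega
          rw [he, h2, hv]

theorem stepA_elem_eq_stepB (m i S : Int) (L : Nat) (N : NStore) (c p v : Int) (adding : List Int)
    (hi : 1 ≤ i) (hp : 0 ≤ p) (hc : S + (L : Int) ≤ c) (hrow : HRow N S L) :
    stepA_elem m i (justIds S L) (N, c, adding) (p, v)
      = ((stepB_elem (m - 1) i S (L : Int) (N, c) (p, v)).1, c + 1, adding ++ [c + 1]) := by
  have h0 : (i == 0) = false := by simp; omega
  have hrow1 : HRow (N.insert (c + 1) (nodeBase v i p)) S L :=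
    HRow_insert_big _ _ _ _ _ (by omega) hrow
  rw [stepB_elem_eq]
  dsimp only
  rw [if_pos (show (0 : Int) < i by omega)]
  simp only [stepA_elem, h0, Bool.false_eq_true, if_false]
  rw [show (PySem.Dict.ofList [("value", some v), ("row", some i), ("position", some p)]
      : PySem.Dict String (Option Int)) = nodeBase v i p from rfl]
  rw [patchA_fold_eq p (c + 1) S L _ hp hrow1]
  by_cases hlast : i = m - 1
  · rw [if_pos (show (i == m - 1) = true by simp [hlast])]
    rw [modify_patchB_comm p (c + 1) S L _ (c + 1) _ hp hrow1 (by omega)]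
    simp only [PySem.Dict.modify, PySem.Dict.getD_insert_self, PySem.Dict.insert_insert_self]
    rw [show nodeB (m - 1) i p v
        = ((nodeBase v i p).insert "L" none).insert "R" none from by
      unfold nodeB
      rw [if_pos (show (i == m - 1 && decide (0 < i)) = true by
        simp only [Bool.and_eq_true, beq_iff_eq, decide_eq_true_eq]; omega)]]
  · rw [if_neg (show ¬ ((i == m - 1) = true) by simp only [beq_iff_eq]; exact hlast)]
    rw [show nodeB (m - 1) i p v = nodeBase v i p from by
      unfold nodeB
      rw [if_neg (show ¬ ((i == m - 1 && decide (0 < i)) = true) by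
        simp only [Bool.and_eq_true, beq_iff_eq, decide_eq_true_eq]; tauto)]]

theorem ids_cons (c : Int) (n : Nat) :
    [c + 1] ++ (List.range n).map (fun q : Nat => c + 1 + 1 + (q : Int))
      = (List.range (n + 1)).map (fun q : Nat => c + 1 + (q : Int)) := by
  rw [List.range_succ_eq_map, List.map_cons, List.map_map]
  simp only [List.singleton_append, Nat.cast_zero, add_zero, List.cons.injEq]
  refine ⟨by trivial, ?_⟩
  apply List.map_congr_left
  intro a _
  simp only [Function.comp_apply]
  push_cast
  omega

theorem rowA_eq_rowB (m i S : Int) (L : Nat) (line : List Int) :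
    ∀ (p0 c : Int) (N : NStore) (adding : List Int), 1 ≤ i → 0 ≤ p0 → S + (L : Int) ≤ c →
    HRow N S L →
    (PySem.List.enumerate line p0).foldl (stepA_elem m i (justIds S L)) (N, c, adding)
      = ((rowB (m - 1) i S (L : Int) line p0 (N, c)).1, (rowB (m - 1) i S (L : Int) line p0 (N, c)).2,
         adding ++ (List.range line.length).map (fun q : Nat => c + 1 + (q : Int))) := by
  induction line with
  | nil =>
    intro p0 c N adding _ _ _ _
    simp [rowB, PySem.List.enumerate_nil]
  | cons v rest ih =>
    intro p0 c N adding hi hp0 hc hrow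
    rw [PySem.List.enumerate_cons, List.foldl_cons,
      stepA_elem_eq_stepB m i S L N c p0 v adding hi hp0 hc hrow]
    set M := (stepB_elem (m - 1) i S (L : Int) (N, c) (p0, v)).1 with hM
    have hrowM : HRow M S L := by
      rw [hM, stepB_elem_eq]
      dsimp only
      split_ifs
      · exact HRow_patchB _ _ _ _ _ _ (HRow_insert_big _ _ _ _ _ (by omega) hrow)
      · exact HRow_insert_big _ _ _ _ _ (by omega) hrow
    rw [ih (p0 + 1) (c + 1) M (adding ++ [c + 1]) hi (by omega) (by omega) hrowM]
    have hrB : rowB (m - 1) i S (L : Int) (v :: rest) p0 (N, c)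
        = rowB (m - 1) i S (L : Int) rest (p0 + 1) (M, c + 1) := by
      rw [hM]
      simp only [rowB, PySem.List.enumerate_cons, List.foldl_cons]
      rw [show stepB_elem (m - 1) i S (L : Int) (N, c) (p0, v)
          = ((stepB_elem (m - 1) i S (L : Int) (N, c) (p0, v)).1, c + 1) from by
        rw [stepB_elem_eq]]
    rw [hrB]
    refine congrArg _ (congrArg _ ?_)
    rw [List.append_assoc]
    refine congrArg _ ?_
    simp only [List.length_cons]
    exact ids_cons c rest.length

theorem row0_eq (m last S0 L0 : Int) (ja : PySem.Set Int) (line : List Int) :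
    ∀ (p0 c : Int) (N : NStore) (adding : List Int),
    (PySem.List.enumerate line p0).foldl (stepA_elem m 0 ja) (N, c, adding)
      = ((rowB last 0 S0 L0 line p0 (N, c)).1, (rowB last 0 S0 L0 line p0 (N, c)).2,
         adding ++ (List.range line.length).map (fun q : Nat => c + 1 + (q : Int))) := by
  induction line with
  | nil =>
    intro p0 c N adding
    simp [rowB, PySem.List.enumerate_nil]
  | cons v rest ih =>
    intro p0 c N adding
    rw [PySem.List.enumerate_cons, List.foldl_cons]
    have hA : stepA_elem m 0 ja (N, c, adding) (p0, v)
        = (N.insert (c + 1) (nodeBase v 0 p0), c + 1, adding ++ [c + 1]) := rfl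
    have hB : stepB_elem last 0 S0 L0 (N, c) (p0, v)
        = (N.insert (c + 1) (nodeBase v 0 p0), c + 1) := by
      rw [stepB_elem_eq]
      dsimp only
      rw [if_neg (show ¬ ((0 : Int) < 0) by omega)]
      rw [show nodeB last 0 p0 v = nodeBase v 0 p0 from by
        unfold nodeB
        rw [if_neg (show ¬ (((0 : Int) == last && decide ((0 : Int) < 0)) = true) by simp)]]
    rw [hA, ih (p0 + 1) (c + 1) _ (adding ++ [c + 1])]
    have hrB : rowB last 0 S0 L0 (v :: rest) p0 (N, c)
        = rowB last 0 S0 L0 rest (p0 + 1) (N.insert (c + 1) (nodeBase v 0 p0), c + 1) := by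
      simp only [rowB, PySem.List.enumerate_cons, List.foldl_cons, hB]
    rw [hrB]
    refine congrArg _ (congrArg _ ?_)
    rw [List.append_assoc]
    refine congrArg _ ?_
    simp only [List.length_cons]
    exact ids_cons c rest.length

theorem justIds_nodup (S : Int) (L : Nat) : (justIds S L).Nodup := by
  refine List.Nodup.map ?_ List.nodup_range
  intro a b h
  simpa using h

theorem outer_eq (m : Int) (rest : List (List Int)) :
    ∀ (i S : Int) (L : Nat) (N : NStore) (c : Int), 1 ≤ i → c = S + (L : Int) → HRow N S L →
    ((PySem.List.enumerate rest i).foldl (stepA_row m) (N, c, justIds S L)).1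
      = ((PySem.List.enumerate rest i).foldl (stepB_row (m - 1)) (N, c, S, (L : Int))).1 := by
  induction rest with
  | nil =>
    intro i S L N c _ _ _
    rfl
  | cons line rest' ih =>
    intro i S L N c hi hc hrow
    rw [PySem.List.enumerate_cons, List.foldl_cons, List.foldl_cons]
    have hrowstep : stepA_row m (N, c, justIds S L) (i, line)
        = ((rowB (m - 1) i S (L : Int) line 0 (N, c)).1,
           (rowB (m - 1) i S (L : Int) line 0 (N, c)).2, justIds c line.length) := by
      simp only [stepA_row]
      rw [rowA_eq_rowB m i S L line 0 c N [] hi (by omega) (by omega) hrow]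
      dsimp only
      rw [List.nil_append]
      rw [show (List.range line.length).map (fun q : Nat => c + 1 + (q : Int))
          = justIds c line.length from rfl]
      rw [PySem.Set.ofList_eq_self_of_nodup _ (justIds_nodup c line.length)]
    have hBstep : stepB_row (m - 1) (N, c, S, (L : Int)) (i, line)
        = ((rowB (m - 1) i S (L : Int) line 0 (N, c)).1,
           (rowB (m - 1) i S (L : Int) line 0 (N, c)).2, c, (line.length : Int)) := by
      simp only [stepB_row, rowB]
    rw [hrowstep, hBstep]
    obtain ⟨hcnt, _, _, hnew⟩ := foldB_facts (m - 1) i S (L : Int) line 0 c N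
    have hrow' : HRow (rowB (m - 1) i S (L : Int) line 0 (N, c)).1 c line.length := by
      intro q hq
      obtain ⟨h1, h2⟩ := hnew q hq
      exact ⟨h1, by simpa using h2⟩
    exact ih (i + 1) c line.length (rowB (m - 1) i S (L : Int) line 0 (N, c)).1
      (rowB (m - 1) i S (L : Int) line 0 (N, c)).2 (by omega) hcnt hrow'

-- ===== VERDICT (by name: the statement is the Claim_ definition above) =====
theorem buildTreeUpDown_spec : Claim_equal_buildTreeUpDown := by
  unfold Claim_equal_buildTreeUpDown
  intro tree _
  unfold Spec_buildTreeUpDown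
  cases tree with
  | nil => rfl
  | cons line rest =>
    simp only [buildTreeUpDown, buildTreeUpDown_alt, PySem.List.enumerate_cons, List.foldl_cons]
    simp only [zero_add]
    have hA0 : stepA_row ((line :: rest).length : Int) (PySem.Dict.empty, 0, PySem.Set.empty) (0, line)
        = ((rowB (((line :: rest).length : Int) - 1) 0 0 0 line 0 (PySem.Dict.empty, 0)).1,
           (rowB (((line :: rest).length : Int) - 1) 0 0 0 line 0 (PySem.Dict.empty, 0)).2,
           justIds 0 line.length) := by
      simp only [stepA_row]
      rw [row0_eq ((line :: rest).length : Int) (((line :: rest).length : Int) - 1) 0 0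
        PySem.Set.empty line 0 0 PySem.Dict.empty []]
      dsimp only
      rw [List.nil_append]
      rw [show (List.range line.length).map (fun q : Nat => (0 : Int) + 1 + (q : Int))
          = justIds 0 line.length from rfl]
      rw [PySem.Set.ofList_eq_self_of_nodup _ (justIds_nodup 0 line.length)]
    have hB0 : stepB_row (((line :: rest).length : Int) - 1) (PySem.Dict.empty, 0, 0, 0) (0, line)
        = ((rowB (((line :: rest).length : Int) - 1) 0 0 0 line 0 (PySem.Dict.empty, 0)).1,
           (rowB (((line :: rest).length : Int) - 1) 0 0 0 line 0 (PySem.Dict.empty, 0)).2,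
           0, (line.length : Int)) := by
      simp only [stepB_row, rowB]
    rw [hA0, hB0]
    obtain ⟨hcnt, _, _, hnew⟩ :=
      foldB_facts (((line :: rest).length : Int) - 1) 0 0 0 line 0 0 PySem.Dict.empty
    have hrow' : HRow (rowB (((line :: rest).length : Int) - 1) 0 0 0 line 0
        (PySem.Dict.empty, 0)).1 0 line.length := by
      intro q hq
      obtain ⟨h1, h2⟩ := hnew q hq
      exact ⟨h1, by simpa using h2⟩
    have h := outer_eq ((line :: rest).length : Int) rest 1 0 line.length
      (rowB (((line :: rest).length : Int) - 1) 0 0 0 line 0 (PySem.Dict.empty, 0)).1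
      (rowB (((line :: rest).length : Int) - 1) 0 0 0 line 0 (PySem.Dict.empty, 0)).2
      (by omega) hcnt hrow'
    rw [h]
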